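-- pv_equiv track=rewrite | github.com/TimBerneiser/rosalind_solver | src/standard_funcs/graph.py | list_overlaps
-- ===== SOURCE A (Python) =====
-- from typing import Tuple, List, Dict
--
-- def list_overlaps(sequences: Dict[str, str], overlap) -> List[Tuple[str, str]]:
--     """ List overlapping sequences """
--
--     seqs = [(id, sequences[id][0:overlap], sequences[id][-overlap:])
--             for id in sequences]
--
--     graphs = list(tuple())
--
--     for i in range(len(seqs)):
--         for j in range(len(seqs)):
--             if i!= j and seqs[i][2] == seqs[j][1]:
--                 graphs.append((seqs[i][0], seqs[j][0]))
--
--     return graphs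
-- ===== SOURCE B (Python) =====
-- def list_overlaps(sequences, overlap):
--     """ List overlapping sequences (hash prefixes, look up each suffix) """
--     ids = list(sequences)
--     by_prefix = {}
--     for j, seq_id in enumerate(ids):
--         by_prefix.setdefault(sequences[seq_id][0:overlap], []).append(j)
--     graphs = []
--     for i, seq_id in enumerate(ids):
--         for j in by_prefix.get(sequences[seq_id][-overlap:], []):
--             if j != i:
--                 graphs.append((seq_id, ids[j]))
--     return graphs
-- ===== Notes on version B (the rewrite author's own statement) =====
-- stated objective: faster
-- what changed: B builds a dict mapping each prefix to the ascending list of indices carrying it, then for each sequence looks up its suffix once, replacing A's nested all-pairs scan.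
import Mathlib
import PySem

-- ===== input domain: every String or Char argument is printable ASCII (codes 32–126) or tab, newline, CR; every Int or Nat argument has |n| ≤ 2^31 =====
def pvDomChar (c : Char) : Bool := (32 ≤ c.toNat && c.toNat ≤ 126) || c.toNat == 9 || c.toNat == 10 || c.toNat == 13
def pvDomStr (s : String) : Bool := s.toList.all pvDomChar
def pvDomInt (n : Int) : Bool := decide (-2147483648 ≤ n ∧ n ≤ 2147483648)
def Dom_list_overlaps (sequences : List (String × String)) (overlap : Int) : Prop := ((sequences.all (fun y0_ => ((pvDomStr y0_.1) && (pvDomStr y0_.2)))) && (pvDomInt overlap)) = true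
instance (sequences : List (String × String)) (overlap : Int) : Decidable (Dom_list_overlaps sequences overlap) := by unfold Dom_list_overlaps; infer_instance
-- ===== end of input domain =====

-- B replaces A's quadratic double scan by a dict of prefix-indexed positions looked up per suffix (same return value; asymptotically fewer comparisons).
-- ===== PORT A =====
def list_overlaps (sequences : List (String × String)) (overlap : Int) : List (String × String) :=
  -- seqs = [(id, sequences[id][0:overlap], sequences[id][-overlap:]) for id in sequences]
  -- 'sequences[id]' is dict lookup; under Pre_ (unique keys) getD with dummy default "" is exact (KeyError impossible: id is a key)
  let seqs := sequences.map (fun p =>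
    let s := (PySem.Dict.mk sequences).getD p.1 ""
    (p.1, PySem.Str.slice s (some 0) (some overlap), PySem.Str.slice s (some (-overlap)) none))
  -- for i in range(len(seqs)): for j in range(len(seqs)): if i != j and seqs[i][2] == seqs[j][1]: graphs.append(...)
  (PySem.List.pyRange 0 (seqs.length : Int) 1).foldl (fun graphs i =>
    (PySem.List.pyRange 0 (seqs.length : Int) 1).foldl (fun graphs j =>
      let si := PySem.List.pyGetD seqs i ("", "", "")
      let sj := PySem.List.pyGetD seqs j ("", "", "")
      if i ≠ j ∧ si.2.2 = sj.2.1 then graphs ++ [(si.1, sj.1)] else graphs) graphs) []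

-- ===== PORT B =====
def list_overlaps_alt (sequences : List (String × String)) (overlap : Int) : List (String × String) :=
  let ids := sequences.map (fun p => p.1)
  -- by_prefix.setdefault(prefix, []).append(j)  ==  by_prefix[prefix] = by_prefix.get(prefix, []) + [j]
  let byPrefix := (PySem.List.enumerate ids 0).foldl (fun d p =>
    d.modify (PySem.Str.slice ((PySem.Dict.mk sequences).getD p.2 "") (some 0) (some overlap)) [] (fun l => l ++ [p.1]))
    PySem.Dict.empty
  (PySem.List.enumerate ids 0).foldl (fun graphs p =>
    (byPrefix.getD (PySem.Str.slice ((PySem.Dict.mk sequences).getD p.2 "") (some (-overlap)) none) []).foldl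
      (fun graphs j => if j ≠ p.1 then graphs ++ [(p.2, PySem.List.pyGetD ids j "")] else graphs) graphs) []

-- ===== PRECONDITION & SPEC =====
-- Pre_ excludes association lists with duplicate keys: they do not represent any Python dict
-- (a dict collapses duplicate keys), so the assoc-list encoding is ambiguous there.
def Pre_list_overlaps (sequences : List (String × String)) (overlap : Int) : Prop :=
  (sequences.map (fun p => p.1)).Nodup
instance (sequences : List (String × String)) (overlap : Int) : Decidable (Pre_list_overlaps sequences overlap) := by
  unfold Pre_list_overlaps; infer_instance
def pvWitness_list_overlaps : (List (String × String)) × Int := ([("a", "xay"), ("b", "ybx")], 1)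

def Spec_list_overlaps (sequences : List (String × String)) (overlap : Int) (out : List (String × String)) : Prop := out = list_overlaps_alt sequences overlap
instance (sequences : List (String × String)) (overlap : Int) (out : List (String × String)) : Decidable (Spec_list_overlaps sequences overlap out) := by unfold Spec_list_overlaps; infer_instance

-- ===== CLAIM (what is proved, stated in full; the proofs are below) =====
def Claim_equal_list_overlaps : Prop := ∀ (sequences : List (String × String)) (overlap : Int), Dom_list_overlaps sequences overlap → Pre_list_overlaps sequences overlap → Spec_list_overlaps sequences overlap (list_overlaps sequences overlap)

-- ===== LEMMAS AND PROOFS =====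

theorem double_loop {γ δ α : Type} (l : List γ) (inner : γ → List δ)
    (P : γ → δ → Prop) [∀ i j, Decidable (P i j)] (f : γ → δ → α) :
    l.foldl (fun acc i => (inner i).foldl
        (fun acc j => if P i j then acc ++ [f i j] else acc) acc) [] =
      l.flatMap (fun i => ((inner i).filter (fun j => decide (P i j))).map (f i)) := by
  have h : (fun (acc : List α) i => (inner i).foldl
        (fun acc j => if P i j then acc ++ [f i j] else acc) acc)
      = fun acc i => acc ++ ((inner i).filter (fun j => decide (P i j))).map (f i) := by
    funext acc i; exact PySem.List.foldl_append_ite (P i) (f i) (inner i) acc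
  rw [h, PySem.List.foldl_append_eq_flatMap]
  simp

theorem groupD (l : List (Int × String)) (K : Int × String → String) (c : String) :
    ((l.foldl (fun d p => d.modify (K p) [] (fun t => t ++ [p.1])) PySem.Dict.empty).getD c []) =
      (l.filter (fun p => K p == c)).map (fun p => p.1) := by
  rw [← List.foldl_map (f := fun (p : Int × String) => (K p, p.1))
        (g := fun (d : PySem.Dict String (List Int)) (q : String × Int) => d.modify q.1 [] (fun t => t ++ [q.2]))]
  rw [PySem.Dict.getD_foldl_modify_append]
  simp [List.filter_map, Function.comp_def]


theorem pyGetD_map_elem {β : Type} (xs : List (String × String)) (j : Int)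
    (h0 : 0 ≤ j) (h1 : j < (xs.length : Int)) (F : (String × String) → β) (d : β) :
    PySem.List.pyGetD (xs.map F) j d = F (xs[j.toNat]'(by omega)) := by
  rw [PySem.List.pyGetD_eq_getElem _ _ h0 (by simpa using h1)]
  simp


theorem map_filter_congr {α β : Type} (l : List α) (p q : α → Bool) (f g : α → β)
    (hp : ∀ j ∈ l, p j = q j) (hf : ∀ j ∈ l, f j = g j) :
    (l.filter p).map f = (l.filter q).map g := by
  rw [List.filter_congr hp]
  exact List.map_congr_left (fun a ha => hf a (List.mem_of_mem_filter ha))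

theorem decide_helper (i j : Int) (X Y : String) :
    decide (i ≠ j ∧ X = Y) = (decide (j ≠ i) && (Y == X)) := by
  by_cases h1 : i = j <;> by_cases h2 : X = Y <;>
    simp [h1, h2, beq_iff_eq, eq_comm (a := X), ne_comm]

theorem ports_eq (sequences : List (String × String)) (overlap : Int) :
    list_overlaps sequences overlap = list_overlaps_alt sequences overlap := by
  unfold list_overlaps list_overlaps_alt
  simp only [PySem.List.enumerate_eq_map_pyRange (d := ""), PySem.List.len, List.length_map]
  rw [double_loop, double_loop]
  simp only [groupD]
  rw [List.flatMap_map]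
  apply List.flatMap_congr
  intro i hi
  rw [PySem.List.mem_pyRange_one] at hi
  simp only [List.filter_map, List.map_map, Function.comp_def, List.filter_filter]
  apply map_filter_congr
  · intro j hj
    rw [PySem.List.mem_pyRange_one] at hj
    simp only [pyGetD_map_elem _ _ hi.1 hi.2, pyGetD_map_elem _ _ hj.1 hj.2]
    exact decide_helper ..
  · intro j hj
    rw [PySem.List.mem_pyRange_one] at hj
    simp only [pyGetD_map_elem _ _ hi.1 hi.2, pyGetD_map_elem _ _ hj.1 hj.2]


-- ===== VERDICT (by name: the statement is the Claim_ definition above) =====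
theorem list_overlaps_spec : Claim_equal_list_overlaps := by
  intro sequences overlap _ _
  unfold Spec_list_overlaps
  exact ports_eq sequences overlap
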